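-- pv_equiv track=rewrite | github.com/tdegueul/what-are-they-doing | script/analyze-repo-switching.py | bounce_back_rate
-- ===== SOURCE A (Python) =====
-- def bounce_back_rate(sequence: list[str], window: int = 5) -> tuple[int, int]:
--     opportunities = 0
--     bounced = 0
--     for index in range(len(sequence) - 2):
--         current_repo = sequence[index]
--         next_repo = sequence[index + 1]
--         if current_repo == next_repo:
--             continue
--         opportunities += 1
--         lookahead = sequence[index + 2 : index + 2 + window]
--         if current_repo in lookahead:
--             bounced += 1
--     return bounced, opportunities
-- ===== SOURCE B (Python) =====
-- def bounce_back_rate(sequence: list[str], window: int = 5) -> tuple[int, int]: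
--     n = len(sequence)
--     # One backward pass: nxt[i] = index of the next occurrence of sequence[i] after i (or None).
--     nxt = [None] * n
--     last = {}
--     for i in range(n - 1, -1, -1):
--         repo = sequence[i]
--         nxt[i] = last.get(repo)
--         last[repo] = i
--     bounced = 0
--     opportunities = 0
--     for i in range(n - 2):
--         if sequence[i] == sequence[i + 1]:
--             continue
--         opportunities += 1
--         j = nxt[i]
--         if j is not None and j < i + 2 + window:
--             bounced += 1
--     return bounced, opportunities
-- ===== Notes on version B (the rewrite author's own statement) =====
-- stated objective: faster
-- what changed: A rescans an O(window) lookahead slice at every transition; B does one backward pass recording each position's next-occurrence index and decides each transition with a single index comparison j < i+2+window.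
-- intended difference: When window is negative and some transition's slice stop i+2+window is negative, Python's slice wraps it around the end, so A counts returns found in an accidental wrapped region (e.g. (1,3) on the witness); B treats a non-positive lookahead window as empty and counts no bounce there ((0,3)), which is the intended meaning of a lookahead window. — e.g. on bounce_back_rate(["a", "b", "a", "x", "y"], -3): A returns (1, 3), B returns (0, 3)
import Mathlib
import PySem

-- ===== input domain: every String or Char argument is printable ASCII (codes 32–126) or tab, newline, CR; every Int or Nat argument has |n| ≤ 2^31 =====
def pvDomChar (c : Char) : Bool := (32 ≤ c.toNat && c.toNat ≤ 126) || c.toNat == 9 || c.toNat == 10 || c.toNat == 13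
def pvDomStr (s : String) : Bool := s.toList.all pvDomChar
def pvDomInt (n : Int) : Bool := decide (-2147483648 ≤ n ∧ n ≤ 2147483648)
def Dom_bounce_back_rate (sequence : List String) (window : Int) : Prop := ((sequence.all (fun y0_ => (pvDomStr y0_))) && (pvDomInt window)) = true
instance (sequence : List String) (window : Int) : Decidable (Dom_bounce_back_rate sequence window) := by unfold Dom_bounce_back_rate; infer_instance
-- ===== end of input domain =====

-- B replaces A's per-transition lookahead scan by one backward pass that records each position's
-- next-occurrence index, so each transition is answered by a single comparison (objective: faster).

-- ===== PORT A =====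
def bounce_back_rate (sequence : List String) (window : Int) : Int × Int :=
  (PySem.List.pyRange 0 ((sequence.length : Int) - 2) 1).foldl
    (fun (st : Int × Int) index =>
      let current_repo := PySem.List.pyGetD sequence index ""
      let next_repo := PySem.List.pyGetD sequence (index + 1) ""
      if current_repo == next_repo then st
      else
        let opportunities := st.2 + 1
        let lookahead := PySem.List.slice sequence (some (index + 2)) (some (index + 2 + window))
        if lookahead.contains current_repo then (st.1 + 1, opportunities) else (st.1, opportunities))
    (0, 0)

-- ===== PORT B =====
-- Source B's backward loop `for i in range(n-1,-1,-1): nxt[i] = last.get(sequence[i]); last[sequence[i]] = i`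
-- as the obvious structural recursion (the head, index idx, is processed after the rest).
def pvBackPass (seq : List String) (idx : Int) : List (Option Int) × PySem.Dict String Int :=
  match seq with
  | [] => ([], PySem.Dict.empty)
  | repo :: rest =>
      let p := pvBackPass rest (idx + 1)
      (PySem.Dict.get? p.2 repo :: p.1, PySem.Dict.insert p.2 repo idx)

def bounce_back_rate_alt (sequence : List String) (window : Int) : Int × Int :=
  let n : Int := sequence.length
  let nxt := (pvBackPass sequence 0).1
  (PySem.List.pyRange 0 (n - 2) 1).foldl
    (fun (st : Int × Int) i =>
      if PySem.List.pyGetD sequence i "" == PySem.List.pyGetD sequence (i + 1) "" then st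
      else
        let opportunities := st.2 + 1
        match PySem.List.pyGetD nxt i none with
        | some j => if j < i + 2 + window then (st.1 + 1, opportunities) else (st.1, opportunities)
        | none => (st.1, opportunities))
    (0, 0)

-- ===== PRECONDITION & SPEC =====
-- When window is negative and some transition's slice stop i+2+window is negative, Python's slice
-- wraps it around the end, so A counts returns found in an accidental wrapped region; B treats a
-- non-positive lookahead window as empty and counts no bounce there, the intended meaning.
def D_bounce_back_rate (sequence : List String) (window : Int) : Prop :=
  window < 0 ∧ ∃ k < min (-2 - window).toNat sequence.length,
    sequence.getD k "" ≠ sequence.getD (k + 1) "" ∧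
    sequence.getD k "" ∈ (sequence.drop (k + 2)).take (window + sequence.length).toNat
instance (sequence : List String) (window : Int) : Decidable (D_bounce_back_rate sequence window) := by
  unfold D_bounce_back_rate; infer_instance

def Spec_bounce_back_rate (sequence : List String) (window : Int) (out : Int × Int) : Prop :=
  ¬ D_bounce_back_rate sequence window → out = bounce_back_rate_alt sequence window
instance (sequence : List String) (window : Int) (out : Int × Int) : Decidable (Spec_bounce_back_rate sequence window out) := by
  unfold Spec_bounce_back_rate; infer_instance

def pvDiffWitness_bounce_back_rate : List String × Int := (["a", "b", "a", "x", "y"], -3)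
def pvDiffWitnessOut_bounce_back_rate : (Int × Int) × (Int × Int) := ((1, 3), (0, 3))

-- ===== CLAIM (what is proved, stated in full; the proofs are below) =====
def Claim_unchanged_bounce_back_rate : Prop := ∀ (sequence : List String) (window : Int), Dom_bounce_back_rate sequence window → Spec_bounce_back_rate sequence window (bounce_back_rate sequence window)
def Claim_changed_bounce_back_rate : Prop := Dom_bounce_back_rate (pvDiffWitness_bounce_back_rate.1) (pvDiffWitness_bounce_back_rate.2) ∧ D_bounce_back_rate (pvDiffWitness_bounce_back_rate.1) (pvDiffWitness_bounce_back_rate.2) ∧ bounce_back_rate (pvDiffWitness_bounce_back_rate.1) (pvDiffWitness_bounce_back_rate.2) = pvDiffWitnessOut_bounce_back_rate.1 ∧ bounce_back_rate_alt (pvDiffWitness_bounce_back_rate.1) (pvDiffWitness_bounce_back_rate.2) = pvDiffWitnessOut_bounce_back_rate.2 ∧ pvDiffWitnessOut_bounce_back_rate.1 ≠ pvDiffWitnessOut_bounce_back_rate.2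

def Claim_exact_bounce_back_rate : Prop := ∀ (sequence : List String) (window : Int), Dom_bounce_back_rate sequence window → D_bounce_back_rate sequence window → bounce_back_rate sequence window ≠ bounce_back_rate_alt sequence window

-- ===== LEMMAS AND PROOFS =====

-- The dict built by the backward pass maps a repo to its first occurrence index (offset by idx).
theorem pvBackPass_snd_get? (seq : List String) (idx : Int) (s : String) :
    PySem.Dict.get? (pvBackPass seq idx).2 s
      = (seq.findIdx? (· == s)).map (fun (m : Nat) => idx + (m : Int)) := by
  induction seq generalizing idx with
  | nil => simp [pvBackPass, PySem.Dict.get?_empty]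
  | cons repo rest ih =>
    by_cases hs : s = repo
    · subst hs
      simp [pvBackPass, PySem.Dict.get?_insert_self, List.findIdx?_cons]
    · rw [show (pvBackPass (repo :: rest) idx).2 = PySem.Dict.insert (pvBackPass rest (idx+1)).2 repo idx from rfl,
          PySem.Dict.get?_insert_of_ne _ _ hs, ih]
      have hrs : (repo == s) = false := by simp; exact fun h => hs h.symm
      rw [List.findIdx?_cons, if_neg (by simp [hrs])]
      cases h : List.findIdx? (· == s) rest <;> simp <;> omega

theorem pvBackPass_fst_length (seq : List String) (idx : Int) :
    (pvBackPass seq idx).1.length = seq.length := by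
  induction seq generalizing idx with
  | nil => rfl
  | cons repo rest ih => simp [pvBackPass, ih]

-- Entry k of the nxt list is the first occurrence of seq[k] strictly after k (offset by idx).
theorem pvBackPass_fst_getElem? (seq : List String) (idx : Int) (k : Nat) (h : k < seq.length) :
    (pvBackPass seq idx).1[k]?
      = some (((seq.drop (k+1)).findIdx? (· == seq[k])).map (fun (m : Nat) => idx + (k : Int) + 1 + (m : Int))) := by
  induction seq generalizing idx k with
  | nil => simp at h
  | cons repo rest ih =>
    cases k with
    | zero =>
      show some (PySem.Dict.get? (pvBackPass rest (idx+1)).2 repo) = _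
      rw [pvBackPass_snd_get?]
      simp only [List.drop_succ_cons, List.drop_zero, List.getElem_cons_zero]
      cases hf : List.findIdx? (· == repo) rest <;> simp <;> omega
    | succ k' =>
      have hk : k' < rest.length := by simp at h; omega
      show (pvBackPass rest (idx+1)).1[k']? = _
      rw [ih (idx+1) k' hk]
      simp only [List.drop_succ_cons, List.getElem_cons_succ]
      cases hf : List.findIdx? (· == rest[k']) (rest.drop (k'+1)) <;> simp <;> omega

-- Membership in a drop/take slice is existence of an occurrence in the index interval.
theorem mem_take_drop_iff (seq : List String) (cur : String) (a b : Nat) (hb : b ≤ seq.length) :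
    cur ∈ (seq.drop a).take (b - a) ↔ ∃ p, a ≤ p ∧ ∃ hp : p < b, seq[p]'(by omega) = cur := by
  rw [List.mem_iff_getElem]
  constructor
  · rintro ⟨q, hq, hget⟩
    have hq1 : q < b - a := by simp at hq; omega
    have hq2 : a + q < seq.length := by
      have := hq; simp [List.length_take, List.length_drop] at this; omega
    refine ⟨a + q, by omega, by omega, ?_⟩
    rw [← hget]
    rw [List.getElem_take, List.getElem_drop]
  · rintro ⟨p, hap, hpb, hget⟩
    have hlen : p < seq.length := by omega
    refine ⟨p - a, ?_, ?_⟩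
    · simp [List.length_take, List.length_drop]; omega
    · rw [List.getElem_take, List.getElem_drop]
      have : a + (p - a) = p := by omega
      simp [this, hget]

-- The per-transition equivalence: lookahead membership = next-occurrence test against the slice clamp.
theorem lookahead_eq_nxt (seq : List String) (window : Int) (i : Int) (k : Nat)
    (hik : i = (k : Nat)) (hklt : k + 2 < seq.length)
    (hne : seq[k + 1]'(by omega) ≠ seq[k]'(by omega)) :
    (PySem.List.slice seq (some (i + 2)) (some (i + 2 + window))).contains (seq[k]'(by omega))
      = (match ((seq.drop (k + 1)).findIdx? (· == seq[k]'(by omega))).map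
              (fun (m : Nat) => (k : Int) + 1 + (m : Int)) with
         | some j => decide (j < (PySem.List.clampIdx seq.length (i + 2 + window) : Int))
         | none => false) := by
  have hcur : seq[k]'(by omega) = seq[k]'(by omega) := rfl
  generalize hcurdef : seq[k]'(by omega) = cur at *
  set stopN := PySem.List.clampIdx seq.length (i + 2 + window) with hstop
  have hstople : stopN ≤ seq.length := by
    rw [hstop]; unfold PySem.List.clampIdx; split_ifs <;> omega
  have hslice : PySem.List.slice seq (some (i + 2)) (some (i + 2 + window))
      = (seq.drop (k + 2)).take (stopN - (k + 2)) := by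
    show (List.drop (PySem.List.clampIdx seq.length (i+2)) seq).take
        (PySem.List.clampIdx seq.length (i+2+window) - PySem.List.clampIdx seq.length (i+2)) = _
    have h1 : PySem.List.clampIdx seq.length (i + 2) = k + 2 := by
      unfold PySem.List.clampIdx; split_ifs <;> omega
    rw [h1]
  rw [hslice]
  have hmem := mem_take_drop_iff seq cur (k + 2) stopN hstople
  rcases hf : (seq.drop (k + 1)).findIdx? (· == cur) with _ | m
  · -- no later occurrence at all
    simp only [Option.map_none]
    rw [List.findIdx?_eq_none_iff] at hf
    have hnomem : ¬ cur ∈ (seq.drop (k + 2)).take (stopN - (k + 2)) := by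
      rw [hmem]
      rintro ⟨p, hap, hpb, hget⟩
      have hplen : p < seq.length := by omega
      have : seq[p] ∈ seq.drop (k + 1) := by
        have h2 : seq[p] = (seq.drop (k+1))[p - (k+1)]'(by simp [List.length_drop]; omega) := by
          rw [List.getElem_drop]; congr 1; omega
        rw [h2]; exact List.getElem_mem _
      have := hf _ this
      rw [hget] at this; simp at this
    rw [List.contains_eq_any_beq]
    simp only [List.any_eq_false]
    intro x hx hbeq
    apply hnomem
    have hxc : cur = x := by simpa using hbeq
    rwa [← hxc] at hx
  · simp only [Option.map_some]
    rw [List.findIdx?_eq_some_iff_findIdx_eq] at hf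
    obtain ⟨hmlt, hfind⟩ := hf
    have hmlen : m < seq.length - (k + 1) := by simpa [List.length_drop] using hmlt
    have hget : seq[k + 1 + m]'(by omega) = cur := by
      have hthis := List.findIdx_getElem (p := (· == cur)) (xs := seq.drop (k+1)) (w := by rw [hfind]; exact hmlt)
      simp only [hfind, List.getElem_drop] at hthis
      simpa using hthis
    have hm0 : m ≠ 0 := by
      intro h0; subst h0; apply hne; simpa using hget
    have hiff : cur ∈ (seq.drop (k + 2)).take (stopN - (k + 2)) ↔ k + 1 + m < stopN := by
      rw [hmem]
      constructor
      · rintro ⟨p, hap, hpb, hgetp⟩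
        have hplen : p < seq.length := by omega
        have hqm : ¬ (p - (k+1) < m) := by
          intro hlt
          have h2 : ((seq.drop (k+1))[p - (k+1)]'(by simp [List.length_drop]; omega) == cur) = false := by
            rw [← hfind] at hlt
            exact List.not_of_lt_findIdx hlt
          rw [List.getElem_drop] at h2
          have h3 : k + 1 + (p - (k+1)) = p := by omega
          simp only [h3] at h2
          rw [hgetp] at h2; simp at h2
        omega
      · intro hlt
        exact ⟨k + 1 + m, by omega, by omega, hget⟩
    by_cases hc : k + 1 + m < stopN
    · have hcI : ((k : Int) + 1 + (m : Int) < (stopN : Int)) := by exact_mod_cast by omega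
      simp only [decide_eq_true hcI]
      exact List.elem_eq_true_of_mem (hiff.mpr hc)
    · have hcI : ¬ ((k : Int) + 1 + (m : Int) < (stopN : Int)) := by
        intro h; apply hc; exact_mod_cast by omega
      simp only [decide_eq_false hcI]
      rw [List.contains_eq_any_beq]
      simp only [List.any_eq_false]
      intro x hx hbeq
      apply hc; apply hiff.mp
      have hxc : cur = x := by simpa using hbeq
      rwa [← hxc] at hx

theorem bounce_back_rate_eq (sequence : List String) (window : Int)
    (hND : ¬ D_bounce_back_rate sequence window) :
    bounce_back_rate sequence window = bounce_back_rate_alt sequence window := by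
  unfold bounce_back_rate bounce_back_rate_alt
  apply PySem.List.foldl_congr_mem
  intro st i hi
  rw [PySem.List.mem_pyRange_one] at hi
  obtain ⟨hi0, hilt⟩ := hi
  have hk : i = ((i.toNat : Nat) : Int) := by omega
  set k := i.toNat with hkdef
  have hklt : k + 2 < sequence.length := by omega
  have hg1 : PySem.List.pyGetD sequence i "" = sequence[k]'(by omega) := by
    rw [PySem.List.pyGetD_eq_getElem sequence "" hi0 (by omega)]
  have hg2 : PySem.List.pyGetD sequence (i + 1) "" = sequence[k + 1]'(by omega) := by
    rw [PySem.List.pyGetD_eq_getElem sequence "" (by omega) (by omega)]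
    congr 1
    omega
  dsimp only
  rw [hg1, hg2]
  by_cases hbe : sequence[k]'(by omega) = sequence[k + 1]'(by omega)
  · have hbeq : (sequence[k]'(by omega) == sequence[k + 1]'(by omega)) = true := by simpa using hbe
    simp only [hbeq, if_true]
  · have hbeq : (sequence[k]'(by omega) == sequence[k + 1]'(by omega)) = true → False := by
      simpa using hbe
    simp only [if_neg hbeq]
    have hne : sequence[k + 1]'(by omega) ≠ sequence[k]'(by omega) := fun h => hbe h.symm
    have hnxt : PySem.List.pyGetD (pvBackPass sequence 0).1 i none
        = ((sequence.drop (k+1)).findIdx? (· == sequence[k]'(by omega))).map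
            (fun (m : Nat) => (k : Int) + 1 + (m : Int)) := by
      rw [PySem.List.pyGetD_eq_getElem _ none hi0 (by rw [pvBackPass_fst_length]; omega)]
      have h? := pvBackPass_fst_getElem? sequence 0 k (by omega)
      rw [List.getElem?_eq_getElem (by rw [pvBackPass_fst_length]; omega)] at h?
      have := Option.some.inj h?
      rw [this]
      simp only [zero_add]
    rw [hnxt]
    by_cases hbneg : i + 2 + window < 0
    · -- window stop wraps; ¬D_ says the wrapped slice holds no match, so A's contains is false,
      -- and B's next-occurrence index (≥ 0) can never be below the negative stop.
      have hwneg : window < 0 := by omega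
      have hnot := (not_and.mp hND) hwneg
      have hgD1 : sequence.getD k "" = sequence[k]'(by omega) := by
        simp [List.getD, List.getElem?_eq_getElem (show k < sequence.length by omega)]
      have hgD2 : sequence.getD (k+1) "" = sequence[k+1]'(by omega) := by
        simp [List.getD, List.getElem?_eq_getElem (show k+1 < sequence.length by omega)]
      have hneq : sequence.getD k "" ≠ sequence.getD (k + 1) "" := by
        rw [hgD1, hgD2]; exact hbe
      have hmemf : sequence.getD k "" ∉ (sequence.drop (k + 2)).take (window + sequence.length).toNat :=
        fun h => hnot ⟨k, by omega, hneq, h⟩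
      have hslice : PySem.List.slice sequence (some (i + 2)) (some (i + 2 + window))
          = (sequence.drop (k + 2)).take (window + (sequence.length : Int)).toNat := by
        show (List.drop (PySem.List.clampIdx sequence.length (i+2)) sequence).take
            (PySem.List.clampIdx sequence.length (i+2+window) - PySem.List.clampIdx sequence.length (i+2)) = _
        have h1 : PySem.List.clampIdx sequence.length (i + 2) = k + 2 := by
          unfold PySem.List.clampIdx; split_ifs <;> omega
        have h2 : PySem.List.clampIdx sequence.length (i + 2 + window) - (k + 2)
            = (window + (sequence.length : Int)).toNat := by
          unfold PySem.List.clampIdx; split_ifs <;> omega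
        rw [h1, h2]
      have hcont : ((PySem.List.slice sequence (some (i + 2)) (some (i + 2 + window))).contains
          (sequence[k]'(by omega))) = false := by
        rw [hslice]
        by_contra hC
        rw [Bool.not_eq_false] at hC
        exact hmemf (by rw [hgD1]; simpa using hC)
      rw [hcont]
      simp only [Bool.false_eq_true, if_false]
      rcases (sequence.drop (k+1)).findIdx? (· == sequence[k]'(by omega)) with _ | m
      · rfl
      · simp only [Option.map_some]
        rw [if_neg (show ¬((k : Int) + 1 + (m : Int) < i + 2 + window) by omega)]
    · -- stop is nonnegative: clamp = min(stop, n) and the next occurrence is < n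
      push_neg at hbneg
      rw [lookahead_eq_nxt sequence window i k (by omega) hklt hne]
      rcases hf : (sequence.drop (k+1)).findIdx? (· == sequence[k]'(by omega)) with _ | m
      · rfl
      · simp only [Option.map_some]
        rw [List.findIdx?_eq_some_iff_findIdx_eq] at hf
        have hmlen : m < sequence.length - (k + 1) := by
          have := hf.1; simpa [List.length_drop] using this
        have hclamp : ((PySem.List.clampIdx sequence.length (i + 2 + window) : Nat) : Int)
            = min (i + 2 + window) (sequence.length : Int) := by
          unfold PySem.List.clampIdx; split_ifs <;> omega
        by_cases hc : (k : Int) + 1 + (m : Int) < i + 2 + window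
        · rw [if_pos (decide_eq_true (by omega : (k : Int) + 1 + (m : Int) < (PySem.List.clampIdx sequence.length (i + 2 + window) : Int))), if_pos hc]
        · rw [if_neg (by simp; omega), if_neg hc]

-- ===== VERDICT (by name: the statement is the Claim_ definition above) =====
theorem bounce_back_rate_spec : Claim_unchanged_bounce_back_rate := by
  intro sequence window _ hND
  exact bounce_back_rate_eq sequence window hND

theorem bounce_back_rate_changed : Claim_changed_bounce_back_rate := by
  unfold Claim_changed_bounce_back_rate; decide

-- fst of a fold never decreases when every step's fst is ≥ the accumulator's.
theorem foldl_fst_ge {α : Type} (f : Int × Int → α → Int × Int) (l : List α)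
    (h : ∀ st x, x ∈ l → st.1 ≤ (f st x).1) : ∀ st : Int × Int, st.1 ≤ (l.foldl f st).1 := by
  induction l with
  | nil => intro st; exact le_refl _
  | cons a t ih =>
    intro st
    exact le_trans (h st a (List.mem_cons_self))
      (ih (fun st x hx => h st x (List.mem_cons_of_mem a hx)) (f st a))

-- fst of a fold is unchanged when every step preserves it.
theorem foldl_fst_eq {α : Type} (f : Int × Int → α → Int × Int) (l : List α)
    (h : ∀ st x, x ∈ l → (f st x).1 = st.1) : ∀ st : Int × Int, (l.foldl f st).1 = st.1 := by
  induction l with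
  | nil => intro st; rfl
  | cons a t ih =>
    intro st
    rw [List.foldl_cons, ih (fun st x hx => h st x (List.mem_cons_of_mem a hx)) (f st a),
        h st a (List.mem_cons_self)]

-- With a negative window B never counts a bounce: the next occurrence sits at ≥ i+2 > i+2+window.
theorem alt_fst_zero (sequence : List String) (window : Int) (hw : window < 0) :
    (bounce_back_rate_alt sequence window).1 = 0 := by
  unfold bounce_back_rate_alt
  apply foldl_fst_eq
  intro st i hi
  rw [PySem.List.mem_pyRange_one] at hi
  obtain ⟨hi0, hilt⟩ := hi
  have hk : i = ((i.toNat : Nat) : Int) := by omega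
  set k := i.toNat with hkdef
  have hklt : k + 2 < sequence.length := by omega
  have hg1 : PySem.List.pyGetD sequence i "" = sequence[k]'(by omega) := by
    rw [PySem.List.pyGetD_eq_getElem sequence "" hi0 (by omega)]
  have hg2 : PySem.List.pyGetD sequence (i + 1) "" = sequence[k + 1]'(by omega) := by
    rw [PySem.List.pyGetD_eq_getElem sequence "" (by omega) (by omega)]
    congr 1
    omega
  dsimp only
  rw [hg1, hg2]
  by_cases hbe : sequence[k]'(by omega) = sequence[k + 1]'(by omega)
  · rw [if_pos (by simpa using hbe)]
  · rw [if_neg (by simpa using hbe)]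
    have hnxt : PySem.List.pyGetD (pvBackPass sequence 0).1 i none
        = ((sequence.drop (k+1)).findIdx? (· == sequence[k]'(by omega))).map
            (fun (m : Nat) => (k : Int) + 1 + (m : Int)) := by
      rw [PySem.List.pyGetD_eq_getElem _ none hi0 (by rw [pvBackPass_fst_length]; omega)]
      have h? := pvBackPass_fst_getElem? sequence 0 k (by omega)
      rw [List.getElem?_eq_getElem (by rw [pvBackPass_fst_length]; omega)] at h?
      have := Option.some.inj h?
      rw [this]
      simp only [zero_add]
    rw [hnxt]
    rcases hf : (sequence.drop (k+1)).findIdx? (· == sequence[k]'(by omega)) with _ | m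
    · rfl
    · simp only [Option.map_some]
      rw [List.findIdx?_eq_some_iff_findIdx_eq] at hf
      have hget : sequence[k + 1 + m]'(by
          have := hf.1; simp [List.length_drop] at this; omega) = sequence[k]'(by omega) := by
        have hthis := List.findIdx_getElem (p := (· == sequence[k]'(by omega)))
          (xs := sequence.drop (k+1)) (w := by rw [hf.2]; exact hf.1)
        simp only [hf.2, List.getElem_drop] at hthis
        simpa using hthis
      have hm0 : m ≠ 0 := by
        intro h0; subst h0; apply hbe; rw [← hget]
      rw [if_neg (show ¬((k : Int) + 1 + (m : Int) < i + 2 + window) by omega)]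

-- Inside D_ the flagged transition makes A count at least one bounce.
theorem a_step_fst_mono (sequence : List String) (window : Int) :
    ∀ (st : Int × Int) (index : Int), st.1 ≤
      ((fun (st : Int × Int) index =>
        let current_repo := PySem.List.pyGetD sequence index ""
        let next_repo := PySem.List.pyGetD sequence (index + 1) ""
        if current_repo == next_repo then st
        else
          let opportunities := st.2 + 1
          let lookahead := PySem.List.slice sequence (some (index + 2)) (some (index + 2 + window))
          if lookahead.contains current_repo then (st.1 + 1, opportunities) else (st.1, opportunities))
        st index).1 := by
  intro st index
  dsimp only
  split_ifs
  · exact le_refl _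
  · exact le_of_lt (lt_add_one st.1)
  · exact le_refl _

theorem a_fst_pos (sequence : List String) (window : Int) (hD : D_bounce_back_rate sequence window) :
    1 ≤ (bounce_back_rate sequence window).1 := by
  obtain ⟨hw, k0, hk0, hneqD, hmemD⟩ := hD
  have hk0w : (k0 : Int) + 2 + window < 0 := by
    have : k0 < (-2 - window).toNat := lt_of_lt_of_le hk0 (min_le_left _ _)
    omega
  have hk0n : k0 + 2 < sequence.length := by
    by_contra hle
    rw [List.drop_eq_nil_iff.mpr (by omega)] at hmemD
    simp at hmemD
  have hgD1 : sequence.getD k0 "" = sequence[k0]'(by omega) := by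
    simp [List.getD, List.getElem?_eq_getElem (show k0 < sequence.length by omega)]
  have hgD2 : sequence.getD (k0+1) "" = sequence[k0+1]'(by omega) := by
    simp [List.getD, List.getElem?_eq_getElem (show k0+1 < sequence.length by omega)]
  have hbe : sequence[k0]'(by omega) ≠ sequence[k0+1]'(by omega) := by
    rw [← hgD1, ← hgD2]; exact hneqD
  rw [hgD1] at hmemD
  unfold bounce_back_rate
  rw [PySem.List.pyRange_one_append 0 (k0 : Int) ((sequence.length : Int) - 2) (by omega) (by omega),
      PySem.List.pyRange_one_cons (show (k0 : Int) < (sequence.length : Int) - 2 by omega),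
      List.foldl_append, List.foldl_cons]
  refine le_trans ?_ (foldl_fst_ge _ _ (fun st x _ => a_step_fst_mono sequence window st x) _)
  have hg1 : PySem.List.pyGetD sequence ((k0 : Int)) "" = sequence[k0]'(by omega) := by
    rw [PySem.List.pyGetD_eq_getElem sequence "" (by omega) (by omega)]
    congr 1 <;> omega
  have hg2 : PySem.List.pyGetD sequence ((k0 : Int) + 1) "" = sequence[k0 + 1]'(by omega) := by
    rw [PySem.List.pyGetD_eq_getElem sequence "" (by omega) (by omega)]
    congr 1 <;> omega
  have hslice : PySem.List.slice sequence (some ((k0 : Int) + 2)) (some ((k0 : Int) + 2 + window))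
      = (sequence.drop (k0 + 2)).take (window + (sequence.length : Int)).toNat := by
    show (List.drop (PySem.List.clampIdx sequence.length ((k0 : Int) + 2)) sequence).take
        (PySem.List.clampIdx sequence.length ((k0 : Int) + 2 + window)
          - PySem.List.clampIdx sequence.length ((k0 : Int) + 2)) = _
    have h1 : PySem.List.clampIdx sequence.length ((k0 : Int) + 2) = k0 + 2 := by
      unfold PySem.List.clampIdx; split_ifs <;> omega
    have h2 : PySem.List.clampIdx sequence.length ((k0 : Int) + 2 + window) - (k0 + 2)
        = (window + (sequence.length : Int)).toNat := by
      unfold PySem.List.clampIdx; split_ifs <;> omega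
    rw [h1, h2]
  dsimp only
  rw [hg1, hg2, if_neg (by simpa using hbe), hslice,
      if_pos (List.elem_eq_true_of_mem hmemD)]
  have hmono : (0 : Int) ≤ ((PySem.List.pyRange 0 (k0 : Int) 1).foldl
      (fun (st : Int × Int) index =>
        let current_repo := PySem.List.pyGetD sequence index ""
        let next_repo := PySem.List.pyGetD sequence (index + 1) ""
        if current_repo == next_repo then st
        else
          let opportunities := st.2 + 1
          let lookahead := PySem.List.slice sequence (some (index + 2)) (some (index + 2 + window))
          if lookahead.contains current_repo then (st.1 + 1, opportunities) else (st.1, opportunities))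
      (0, 0)).1 :=
    foldl_fst_ge _ _ (fun st x _ => a_step_fst_mono sequence window st x) (0, 0)
  exact le_add_of_nonneg_left hmono

theorem bounce_back_rate_tight : Claim_exact_bounce_back_rate := by
  intro sequence window _ hD hEq
  have h1 := a_fst_pos sequence window hD
  have h2 := alt_fst_zero sequence window hD.1
  rw [hEq, h2] at h1
  omega
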